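-- pv_equiv track=rewrite | github.com/iKiru-hub/PCNN | src/models.py | _adjust_num_per_cycle
-- ===== SOURCE A (Python) =====
-- def _adjust_num_per_cycle(k: int, N: int) -> int:
--
--     """
--     optimize the number of neurons per cycles given an initial preferred number
--
--     Parameters
--     ----------
--     k: int
--         Preferred number of neurons per cycle
--     N: int
--         Number of neurons
--
--     Returns
--     -------
--     j: int
--         Number of neurons per cycle
--     """
--
--     # case: N smaller than k
--     if N < k:
--         return N
--
--     j = 0
--     distance = N
--     for pair in [[N%i, i] for i in range(1, N)]:
--         if pair[0] == 0 and abs(k - pair[1]) < distance: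
--             j = pair[1]
--             distance = abs(k - pair[1])
--     return j
-- ===== SOURCE B (Python) =====
-- def _adjust_num_per_cycle(k: int, N: int) -> int:
--     """Divisor of N in 1..N-1 closest to k (ties -> smaller divisor); N itself if N < k.
--     Enumerates divisor pairs up to sqrt(N) instead of scanning 1..N-1."""
--     if N < k:
--         return N
--     best = (N, 0)  # (distance, divisor); stays (N, 0) when no candidate beats distance N
--     i = 1
--     while i * i <= N:
--         if N % i == 0:
--             for d in (i, N // i):
--                 if d < N:
--                     cand = (abs(k - d), d)
--                     if cand < best:
--                         best = cand
--         i += 1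
--     return best[1]
-- ===== Notes on version B (the rewrite author's own statement) =====
-- stated objective: faster
-- what changed: Instead of scanning all residues N%i for i in 1..N-1, B enumerates divisor pairs (i, N//i) only up to sqrt(N) and keeps the lexicographic minimum of (|k-d|, d), which reproduces A's closest-divisor choice and its ascending tie-break.
import Mathlib
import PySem

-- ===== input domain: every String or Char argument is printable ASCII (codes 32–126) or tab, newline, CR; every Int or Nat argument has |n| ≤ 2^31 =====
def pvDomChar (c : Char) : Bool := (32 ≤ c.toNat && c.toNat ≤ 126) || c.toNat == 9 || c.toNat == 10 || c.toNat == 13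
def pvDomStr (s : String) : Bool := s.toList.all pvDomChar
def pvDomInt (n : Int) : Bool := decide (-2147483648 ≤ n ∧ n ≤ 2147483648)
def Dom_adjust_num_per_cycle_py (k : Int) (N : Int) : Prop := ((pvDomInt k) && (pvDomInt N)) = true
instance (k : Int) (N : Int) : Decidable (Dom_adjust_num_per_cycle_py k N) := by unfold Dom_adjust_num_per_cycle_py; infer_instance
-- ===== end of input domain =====

-- B replaces A's O(N) scan of all i in 1..N-1 by an O(sqrt(N)) enumeration of divisor
-- pairs (i, N//i), keeping the lexicographic minimum of (|k-d|, d); same return value.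


-- ===== PORT A =====
-- loop body of A: state is (j, distance), pair is (N % i, i)
def pvAStep (k : Int) (st : Int × Int) (p : Int × Int) : Int × Int :=
  if p.1 = 0 ∧ |k - p.2| < st.2 then (p.2, |k - p.2|) else st

def adjust_num_per_cycle_py (k : Int) (N : Int) : Int :=
  if N < k then N
  else
    (((PySem.List.pyRange 1 N 1).map (fun i => (PySem.Int.mod N i, i))).foldl
      (pvAStep k) (0, N)).1

-- ===== PORT B =====
-- `if d < N: cand = (abs(k-d), d); if cand < best: best = cand`  (tuple `<` is lexicographic)
def pvBStep (k : Int) (N : Int) (best : Int × Int) (d : Int) : Int × Int :=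
  if d < N then
    if |k - d| < best.1 ∨ (|k - d| = best.1 ∧ d < best.2) then (|k - d|, d) else best
  else best

-- the `while i * i <= N` loop; the `1 ≤ i` conjunct (invariant of the Python loop, which
-- starts at i = 1 and only increments) is a termination guard only
def pvBLoop (k : Int) (N : Int) (i : Int) (best : Int × Int) : Int × Int :=
  if h : 1 ≤ i ∧ i * i ≤ N then
    pvBLoop k N (i + 1)
      (if PySem.Int.mod N i = 0 then
        pvBStep k N (pvBStep k N best i) (PySem.Int.floordiv N i)
      else best)
  else best
termination_by (N + 1 - i).toNat
decreasing_by
  have h2 : i ≤ N := le_trans (by nlinarith [h.1] : i ≤ i * i) h.2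
  omega

def adjust_num_per_cycle_py_alt (k : Int) (N : Int) : Int :=
  if N < k then N else (pvBLoop k N 1 (N, 0)).2

-- ===== PRECONDITION & SPEC =====
def Spec_adjust_num_per_cycle_py (k : Int) (N : Int) (out : Int) : Prop := out = adjust_num_per_cycle_py_alt k N
instance (k : Int) (N : Int) (out : Int) : Decidable (Spec_adjust_num_per_cycle_py k N out) := by unfold Spec_adjust_num_per_cycle_py; infer_instance

-- ===== CLAIM (what is proved, stated in full; the proofs are below) =====
def Claim_equal_adjust_num_per_cycle_py : Prop := ∀ (k : Int) (N : Int), Dom_adjust_num_per_cycle_py k N → Spec_adjust_num_per_cycle_py k N (adjust_num_per_cycle_py k N)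

-- ===== LEMMAS AND PROOFS =====

-- proper divisor of N
def pvPD (N d : Int) : Prop := 1 ≤ d ∧ d < N ∧ d ∣ N

-- `b` is lexicographically ≤ the candidate pair (|k - d|, d)
def pvMin (k : Int) (b : Int × Int) (d : Int) : Prop :=
  b.1 < |k - d| ∨ (b.1 = |k - d| ∧ b.2 ≤ d)

-- `b` is the initial pair (N, 0) or a candidate pair that beat it
def pvShape (k N : Int) (P : Int → Prop) (b : Int × Int) : Prop :=
  b = (N, 0) ∨ (P b.2 ∧ b.1 = |k - b.2| ∧ b.1 < N)

-- `b` is THE lexicographic minimum of (N, 0) and all candidate pairs with P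
def pvGood (k N : Int) (P : Int → Prop) (b : Int × Int) : Prop :=
  pvShape k N P b ∧ ∀ d, P d → pvMin k b d

lemma pvShape_mono {k N : Int} {P P' : Int → Prop} (h : ∀ d, P d → P' d)
    {b : Int × Int} (hs : pvShape k N P b) : pvShape k N P' b := by
  rcases hs with h1 | ⟨h1, h2, h3⟩
  · exact Or.inl h1
  · exact Or.inr ⟨h _ h1, h2, h3⟩

lemma pvGood_uniq {k N : Int} {P P' : Int → Prop} (hPP : ∀ d, P d ↔ P' d)
    {b b' : Int × Int} (hb : pvGood k N P b) (hb' : pvGood k N P' b') : b = b' := by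
  obtain ⟨hs, hm⟩ := hb
  obtain ⟨hs', hm'⟩ := hb'
  rcases hs with h | ⟨hP, he, hl⟩ <;> rcases hs' with h' | ⟨hP', he', hl'⟩
  · rw [h, h']
  · have := hm b'.2 ((hPP _).mpr hP')
    subst h; unfold pvMin at this; simp only at this; omega
  · have := hm' b.2 ((hPP _).mp hP)
    subst h'; unfold pvMin at this; simp only at this; omega
  · have h1 := hm b'.2 ((hPP _).mpr hP')
    have h2 := hm' b.2 ((hPP _).mp hP)
    unfold pvMin at h1 h2
    have : b.1 = b'.1 ∧ b.2 = b'.2 := by omega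
    exact Prod.ext this.1 this.2

-- ---- side A: the ascending scan computes the lexicographic minimum ----

lemma pvA_fold_good (k N : Int) (l : List Int) (hp : l.Pairwise (· < ·))
    (hpos : ∀ d ∈ l, 1 ≤ d) :
    pvGood k N (fun d => d ∈ l ∧ d ∣ N)
      (((l.foldl (fun st i => pvAStep k st (PySem.Int.mod N i, i)) (0, N)).2,
        (l.foldl (fun st i => pvAStep k st (PySem.Int.mod N i, i)) (0, N)).1)) := by
  induction l using List.reverseRecOn with
  | nil =>
    refine ⟨Or.inl rfl, ?_⟩
    rintro d ⟨hd, -⟩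
    simp at hd
  | append_singleton l a ih =>
    rw [List.pairwise_append] at hp
    have hl := ih hp.1 (fun d hd => hpos d (List.mem_append_left _ hd))
    have ha1 : 1 ≤ a := hpos a (List.mem_append_right _ (List.mem_cons_self ..))
    have hcross : ∀ e ∈ l, e < a := fun e he =>
      hp.2.2 e he a (List.mem_cons_self ..)
    set s := l.foldl (fun st i => pvAStep k st (PySem.Int.mod N i, i)) (0, N) with hs
    rw [List.foldl_append, List.foldl_cons, List.foldl_nil, ← hs]
    obtain ⟨hshape, hmin⟩ := hl
    have hs2N : s.2 ≤ N := by
      rcases hshape with h | ⟨-, -, h⟩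
      · rw [Prod.ext_iff] at h; simp only at h; omega
      · simp only at h; omega
    unfold pvAStep
    simp only [PySem.Int.mod_eq_zero_iff_dvd]
    by_cases hc : a ∣ N ∧ |k - a| < s.2
    · rw [if_pos hc]
      refine ⟨Or.inr ⟨⟨List.mem_append_right _ (List.mem_cons_self ..), hc.1⟩, rfl, ?_⟩, ?_⟩
      · simp only; omega
      · rintro d ⟨hd, hdvd⟩
        rcases List.mem_append.mp hd with hd | hd
        · have := hmin d ⟨hd, hdvd⟩
          unfold pvMin at this ⊢; simp only at this ⊢; omega
        · have : d = a := by simpa using hd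
          subst this
          exact Or.inr ⟨rfl, le_refl _⟩
    · rw [if_neg hc]
      refine ⟨pvShape_mono (fun d hd => ⟨List.mem_append_left _ hd.1, hd.2⟩) hshape, ?_⟩
      rintro d ⟨hd, hdvd⟩
      rcases List.mem_append.mp hd with hd | hd
      · exact hmin d ⟨hd, hdvd⟩
      · have hda : d = a := by simpa using hd
        subst hda
        have hge : s.2 ≤ |k - d| := by
          by_contra hlt
          exact hc ⟨hdvd, by omega⟩
        have hs1 : s.1 ≤ d := by
          rcases hshape with hsh | ⟨⟨hmem, -⟩, -, -⟩
          · rw [Prod.ext_iff] at hsh; simp only at hsh; omega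
          · exact le_of_lt (hcross _ hmem)
        unfold pvMin; simp only; omega

-- ---- side B: the sqrt loop computes the same lexicographic minimum ----

-- divisor candidates already emitted by the loop before reaching counter value i
def pvSeen (N i d : Int) : Prop := ∃ j, 1 ≤ j ∧ j < i ∧ j * j ≤ N ∧ (d = j ∨ d * j = N)

lemma pvBStep_mono (k N : Int) (b : Int × Int) (d e : Int) (h : pvMin k b e) :
    pvMin k (pvBStep k N b d) e := by
  unfold pvBStep
  split_ifs with h1 h2
  · unfold pvMin at h ⊢; simp only at h ⊢; omega
  · exact h
  · exact h

lemma pvBStep_self (k N : Int) (b : Int × Int) (d : Int) (hd : d < N) :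
    pvMin k (pvBStep k N b d) d := by
  unfold pvBStep
  rw [if_pos hd]
  split_ifs with h
  · exact Or.inr ⟨rfl, le_refl _⟩
  · unfold pvMin; omega

lemma pvBStep_shape (k N : Int) (b : Int × Int) (d : Int) (hd : 1 ≤ d) (hdvd : d ∣ N)
    (hs : pvShape k N (pvPD N) b) : pvShape k N (pvPD N) (pvBStep k N b d) := by
  unfold pvBStep
  split_ifs with h1 h2
  · refine Or.inr ⟨⟨hd, h1, hdvd⟩, rfl, ?_⟩
    rcases hs with h | ⟨-, -, h⟩
    · rw [Prod.ext_iff] at h; simp only at h ⊢; omega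
    · simp only at h ⊢; omega
  · exact hs
  · exact hs

lemma pvBLoop_good (k N : Int) : ∀ (i : Int) (best : Int × Int), 1 ≤ i →
    pvShape k N (pvPD N) best →
    (∀ d, pvPD N d → pvSeen N i d → pvMin k best d) →
    pvGood k N (pvPD N) (pvBLoop k N i best) := by
  intro i best
  induction i, best using pvBLoop.induct k N with
  | case1 i best h ih =>
    intro hi hshape hseen
    rw [pvBLoop, dif_pos h]
    by_cases hm : PySem.Int.mod N i = 0
    · rw [if_pos hm]
      rw [dif_pos hm] at ih
      have hidvd : i ∣ N := (PySem.Int.mod_eq_zero_iff_dvd N i).mp hm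
      have hfd : PySem.Int.floordiv N i = N / i := PySem.Int.floordiv_eq_ediv_of_pos (by omega)
      have hci : N / i * i = N := Int.ediv_mul_cancel hidvd
      have hc1 : 1 ≤ N / i := by
        rcases le_or_gt 1 (N / i) with h' | h'
        · exact h'
        · exfalso; nlinarith [h.1, h.2]
      have hcdvd : N / i ∣ N := ⟨i, hci.symm⟩
      apply ih
      · omega
      · rw [hfd]
        exact pvBStep_shape k N _ _ hc1 hcdvd (pvBStep_shape k N _ _ h.1 hidvd hshape)
      · rintro d hPD ⟨j, hj1, hji, hjsq, hj⟩
        rcases lt_or_eq_of_le (by omega : j ≤ i) with hji' | hji'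
        · exact pvBStep_mono k N _ _ _
            (pvBStep_mono k N _ _ _ (hseen d hPD ⟨j, hj1, hji', hjsq, hj⟩))
        · subst hji'
          rcases hj with hj | hj
          · subst hj
            exact pvBStep_mono k N _ _ _ (pvBStep_self k N _ _ hPD.2.1)
          · have hdc : d = N / j := by
              have : d * j = N / j * j := by omega
              exact mul_right_cancel₀ (by omega) this
            rw [hfd, ← hdc]
            exact pvBStep_self k N _ _ hPD.2.1
    · rw [if_neg hm]
      rw [dif_neg hm] at ih
      apply ih
      · omega
      · exact hshape
      · rintro d hPD ⟨j, hj1, hji, hjsq, hj⟩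
        rcases lt_or_eq_of_le (by omega : j ≤ i) with hji' | hji'
        · exact hseen d hPD ⟨j, hj1, hji', hjsq, hj⟩
        · exfalso
          subst hji'
          apply hm
          rw [PySem.Int.mod_eq_zero_iff_dvd]
          rcases hj with hj | hj
          · exact hj ▸ hPD.2.2
          · exact ⟨d, by rw [← hj, mul_comm]⟩
  | case2 i best h =>
    intro hi hshape hseen
    rw [pvBLoop, dif_neg h]
    refine ⟨hshape, ?_⟩
    intro d hPD
    apply hseen d hPD
    obtain ⟨hd1, hdN, c, hc⟩ := hPD
    have hNi : N < i * i := by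
      rcases not_and_or.mp h with h' | h'
      · omega
      · omega
    have hc1 : 1 ≤ c := by nlinarith
    refine ⟨if d ≤ c then d else c, ?_, ?_, ?_, ?_⟩
    · split_ifs <;> omega
    · -- min d c < i   (else i*i ≤ (min d c)^2 ≤ d*c = N)
      by_contra hcon
      push Not at hcon
      split_ifs at hcon with hdc
      · nlinarith
      · nlinarith
    · split_ifs with hdc <;> nlinarith
    · split_ifs with hdc
      · exact Or.inl rfl
      · exact Or.inr (by omega)

-- ===== VERDICT (by name: the statement is the Claim_ definition above) =====
theorem adjust_num_per_cycle_py_spec : Claim_equal_adjust_num_per_cycle_py := by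
  intro k N _
  unfold Spec_adjust_num_per_cycle_py adjust_num_per_cycle_py adjust_num_per_cycle_py_alt
  by_cases hk : N < k
  · rw [if_pos hk, if_pos hk]
  · rw [if_neg hk, if_neg hk]
    rw [List.foldl_map]
    have hA := pvA_fold_good k N (PySem.List.pyRange 1 N 1)
      (PySem.List.pairwise_lt_pyRange_one 1 N)
      (fun d hd => (PySem.List.mem_pyRange_one.mp hd).1)
    have hB := pvBLoop_good k N 1 (N, 0) (le_refl 1) (Or.inl rfl)
      (by rintro d - ⟨j, hj1, hji, -, -⟩; omega)
    have hPP : ∀ d, (d ∈ PySem.List.pyRange 1 N 1 ∧ d ∣ N) ↔ pvPD N d := by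
      intro d
      rw [PySem.List.mem_pyRange_one]
      unfold pvPD
      constructor
      · rintro ⟨⟨h1, h2⟩, h3⟩; exact ⟨h1, h2, h3⟩
      · rintro ⟨h1, h2, h3⟩; exact ⟨⟨h1, h2⟩, h3⟩
    have heq := pvGood_uniq hPP hA hB
    rw [Prod.ext_iff] at heq
    exact heq.2
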